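-- pv_equiv track=rewrite | github.com/Krimmi/Advanced-Trading-Platform | src/ml_models/sentiment_analysis/sentiment_analyzer.py | _split_transcript_sections
-- ===== SOURCE A (Python) =====
-- from typing import Dict, List, Any, Optional, Union, Tuple
--
-- def _split_transcript_sections(transcript: str) -> Dict[str, str]:
--     """
--     Split an earnings call transcript into sections.
--
--     Args:
--         transcript: Earnings call transcript
--
--     Returns:
--         Dictionary with section names and texts
--     """
--     # This is a simplified implementation
--     # In a real implementation, this would use more sophisticated parsing
--
--     sections = {}
--
--     # Try to identify common sections
--     lines = transcript.split('\n')
--     current_section = "introduction"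
--     current_text = []
--
--     for line in lines:
--         lower_line = line.lower()
--
--         # Check for section headers
--         if "prepared remarks" in lower_line or "opening statement" in lower_line:
--             # Save previous section
--             if current_text:
--                 sections[current_section] = '\n'.join(current_text)
--
--             current_section = "prepared_remarks"
--             current_text = []
--
--         elif "question and answer" in lower_line or "q&a" in lower_line:
--             # Save previous section
--             if current_text:
--                 sections[current_section] = '\n'.join(current_text)
--
--             current_section = "q_and_a"
--             current_text = []
--
--         elif "financial results" in lower_line or "financial performance" in lower_line:
--             # Save previous section
--             if current_text:
--                 sections[current_section] = '\n'.join(current_text)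
--
--             current_section = "financial_results"
--             current_text = []
--
--         elif "outlook" in lower_line or "guidance" in lower_line or "forecast" in lower_line:
--             # Save previous section
--             if current_text:
--                 sections[current_section] = '\n'.join(current_text)
--
--             current_section = "outlook"
--             current_text = []
--
--         elif "conclusion" in lower_line or "closing remarks" in lower_line:
--             # Save previous section
--             if current_text:
--                 sections[current_section] = '\n'.join(current_text)
--
--             current_section = "conclusion"
--             current_text = []
--
--         else:
--             # Add line to current section
--             current_text.append(line)
--
--     # Save the last section
--     if current_text:
--         sections[current_section] = '\n'.join(current_text)
--
--     return sections
-- ===== SOURCE B (Python) =====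
-- # Alternative decomposition: first split the line stream into header-delimited
-- # segments (span/scan, building a (name, text) list), then build the dict once.
-- def _split_transcript_sections(transcript: str):
--     groups = [
--         (("prepared remarks", "opening statement"), "prepared_remarks"),
--         (("question and answer", "q&a"), "q_and_a"),
--         (("financial results", "financial performance"), "financial_results"),
--         (("outlook", "guidance", "forecast"), "outlook"),
--         (("conclusion", "closing remarks"), "conclusion"),
--     ]
--
--     def header(line):
--         low = line.lower()
--         for keywords, name in groups:
--             if any(k in low for k in keywords):
--                 return name
--         return None
--
--     segs = []
--     name = "introduction"
--     lines = transcript.split('\n')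
--     while lines:
--         k = 0
--         while k < len(lines) and header(lines[k]) is None:
--             k += 1
--         body = lines[:k]                      # run of non-header lines
--         if body:
--             segs.append((name, '\n'.join(body)))
--         if k < len(lines):                    # lines[k] is a header line
--             name = header(lines[k])
--         lines = lines[k + 1:]
--
--     result = {}
--     for key, text in segs:
--         result[key] = text
--     return result
-- ===== Notes on version B (the rewrite author's own statement) =====
-- stated objective: alternative
-- what changed: Replaces A's single fold with a running (dict, current_section, current_text) accumulator by a two-phase shape: a span-based scan that cuts the line list into header-delimited (name, body) segments, followed by one dict-building pass over the segment list.
import Mathlib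
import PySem

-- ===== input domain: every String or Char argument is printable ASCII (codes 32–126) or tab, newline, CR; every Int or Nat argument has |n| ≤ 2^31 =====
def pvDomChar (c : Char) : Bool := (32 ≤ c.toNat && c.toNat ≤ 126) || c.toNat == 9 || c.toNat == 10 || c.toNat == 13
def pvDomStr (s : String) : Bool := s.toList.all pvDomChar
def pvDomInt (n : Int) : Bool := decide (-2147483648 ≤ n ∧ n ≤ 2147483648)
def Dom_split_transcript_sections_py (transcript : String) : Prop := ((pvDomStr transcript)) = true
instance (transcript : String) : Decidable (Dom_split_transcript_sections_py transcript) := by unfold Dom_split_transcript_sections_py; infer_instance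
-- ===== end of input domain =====

-- B replaces A's single fold with a running (dict, section, text) accumulator by a
-- span-based segmentation pass followed by one dict-building pass (objective: alternative).

-- ===== PORT A =====
-- "save previous section": if current_text: sections[current_section] = '\n'.join(current_text)
def pvSaveA (st : PySem.Dict String String × String × List String) : PySem.Dict String String :=
  if st.2.2 = [] then st.1 else st.1.insert st.2.1 (PySem.Str.join "\n" st.2.2)

-- the body of A's for-loop, one line
def pvStepA (st : PySem.Dict String String × String × List String) (line : String) :
    PySem.Dict String String × String × List String :=
  let lower_line := PySem.Str.lower line
  if PySem.Str.isIn "prepared remarks" lower_line || PySem.Str.isIn "opening statement" lower_line then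
    (pvSaveA st, "prepared_remarks", [])
  else if PySem.Str.isIn "question and answer" lower_line || PySem.Str.isIn "q&a" lower_line then
    (pvSaveA st, "q_and_a", [])
  else if PySem.Str.isIn "financial results" lower_line || PySem.Str.isIn "financial performance" lower_line then
    (pvSaveA st, "financial_results", [])
  else if PySem.Str.isIn "outlook" lower_line || PySem.Str.isIn "guidance" lower_line || PySem.Str.isIn "forecast" lower_line then
    (pvSaveA st, "outlook", [])
  else if PySem.Str.isIn "conclusion" lower_line || PySem.Str.isIn "closing remarks" lower_line then
    (pvSaveA st, "conclusion", [])
  else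
    (st.1, st.2.1, st.2.2 ++ [line])

def split_transcript_sections_py (transcript : String) : List (String × String) :=
  let lines := (PySem.Str.split? transcript "\n").getD []
  let fin := lines.foldl pvStepA ((PySem.Dict.empty : PySem.Dict String String), "introduction", ([] : List String))
  (pvSaveA fin).items

-- ===== PORT B =====
def pvGroups : List (List String × String) :=
  [(["prepared remarks", "opening statement"], "prepared_remarks"),
   (["question and answer", "q&a"], "q_and_a"),
   (["financial results", "financial performance"], "financial_results"),
   (["outlook", "guidance", "forecast"], "outlook"),
   (["conclusion", "closing remarks"], "conclusion")]

-- header(line): first group one of whose keywords occurs in line.lower(), else None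
def pvHeader? (line : String) : Option String :=
  let low := PySem.Str.lower line
  pvGroups.findSome? (fun g => if g.1.any (fun k => PySem.Str.isIn k low) then some g.2 else none)

-- the outer while-loop of Source B: cut off the span of non-header lines, emit a segment,
-- consume the header line, continue on the remainder
def pvSegs (name : String) (lines : List String) : List (String × String) :=
  let body := lines.takeWhile (fun l => (pvHeader? l).isNone)
  let seg := if body.isEmpty then [] else [(name, PySem.Str.join "\n" body)]
  match hr : lines.dropWhile (fun l => (pvHeader? l).isNone) with
  | [] => seg
  | h :: t => seg ++ pvSegs ((pvHeader? h).getD "") t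
termination_by lines.length
decreasing_by
  have h1 := List.length_dropWhile_le (p := fun l => (pvHeader? l).isNone) (l := lines)
  rw [hr] at h1; simp at h1 ⊢; omega

def split_transcript_sections_py_alt (transcript : String) : List (String × String) :=
  let lines := (PySem.Str.split? transcript "\n").getD []
  ((pvSegs "introduction" lines).foldl
      (fun (d : PySem.Dict String String) p => d.insert p.1 p.2) PySem.Dict.empty).items

-- ===== PRECONDITION & SPEC =====
def Spec_split_transcript_sections_py (transcript : String) (out : List (String × String)) : Prop := out = split_transcript_sections_py_alt transcript
instance (transcript : String) (out : List (String × String)) : Decidable (Spec_split_transcript_sections_py transcript out) := by unfold Spec_split_transcript_sections_py; infer_instance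

-- ===== CLAIM (what is proved, stated in full; the proofs are below) =====
def Claim_equal_split_transcript_sections_py : Prop := ∀ (transcript : String), Dom_split_transcript_sections_py transcript → Spec_split_transcript_sections_py transcript (split_transcript_sections_py transcript)

-- ===== LEMMAS AND PROOFS =====

-- A's branch chain is exactly "dispatch on pvHeader?"
lemma pvStepA_eq (st : PySem.Dict String String × String × List String) (line : String) :
    pvStepA st line =
      match pvHeader? line with
      | some nm => (pvSaveA st, nm, [])
      | none => (st.1, st.2.1, st.2.2 ++ [line]) := by
  simp only [pvStepA, pvHeader?, pvGroups, List.findSome?, List.any_cons, List.any_nil,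
    Bool.or_false, Bool.or_assoc]
  split_ifs <;> rfl

-- folding A's step over a run of non-header lines just accumulates the text
lemma pvFold_body (body : List String) (h : ∀ l ∈ body, pvHeader? l = none)
    (d : PySem.Dict String String) (cur : String) (text : List String) :
    body.foldl pvStepA (d, cur, text) = (d, cur, text ++ body) := by
  induction body generalizing text with
  | nil => simp
  | cons b bs ih =>
      have hb : pvHeader? b = none := h b (by simp)
      simp only [List.foldl_cons, pvStepA_eq, hb]
      rw [ih (fun l hl => h l (by simp [hl]))]
      simp

-- main invariant: running A from a fresh text accumulator equals inserting B's segments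
lemma pvMain (name : String) (lines : List String) (d : PySem.Dict String String) :
    pvSaveA (lines.foldl pvStepA (d, name, [])) =
      (pvSegs name lines).foldl (fun d p => d.insert p.1 p.2) d := by
  fun_induction pvSegs name lines generalizing d with
  | case1 name lines body seg hr =>
      have hl : lines = body := by
        conv_lhs => rw [← List.takeWhile_append_dropWhile
          (p := fun l => (pvHeader? l).isNone) (l := lines)]
        rw [hr]; simp [body]
      rw [hl, pvFold_body body
        (fun l hl' => by
          have := List.mem_takeWhile_imp hl'
          simpa [Option.isNone_iff_eq_none] using this) d name []]
      by_cases hb : body = [] <;> simp [pvSaveA, seg, hb]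
  | case2 name lines body seg h t hr ih =>
      have hl : lines = body ++ h :: t := by
        conv_lhs => rw [← List.takeWhile_append_dropWhile
          (p := fun l => (pvHeader? l).isNone) (l := lines)]
        rw [hr]
      have hh : (pvHeader? h).isSome = true := by
        have := List.head?_dropWhile_not (p := fun l => (pvHeader? l).isNone) (l := lines)
        rw [hr] at this
        simpa using this
      obtain ⟨nm, hnm⟩ := Option.isSome_iff_exists.mp hh
      rw [hl, List.foldl_append, pvFold_body body
        (fun l hl' => by
          have := List.mem_takeWhile_imp hl'
          simpa [Option.isNone_iff_eq_none] using this) d name []]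
      simp only [List.foldl_cons, pvStepA_eq, hnm, List.nil_append, Option.getD_some] at ih ⊢
      rw [ih, List.foldl_append]
      have hseg : seg.foldl (fun (d : PySem.Dict String String) p => d.insert p.1 p.2) d
          = pvSaveA (d, name, body) := by
        by_cases hb : body = [] <;> simp [pvSaveA, seg, hb]
      rw [hseg]

-- ===== VERDICT (by name: the statement is the Claim_ definition above) =====
theorem split_transcript_sections_py_spec : Claim_equal_split_transcript_sections_py := by
  intro transcript _
  unfold Spec_split_transcript_sections_py
  simp only [split_transcript_sections_py, split_transcript_sections_py_alt, pvMain]
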